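-- pv_equiv track=rewrite | github.com/Rouzax/TrackSplit | src/tracksplit/tagger.py | _count_tag_deltas
-- ===== SOURCE A (Python) =====
-- def _count_tag_deltas(
--     existing: dict | None,
--     new_tags: dict[str, list[str]],
-- ) -> tuple[int, int, int]:
--     """Return (added, removed, changed) between existing tags (a Mutagen
--     tag dict or None) and the new tag dict that build_tag_dict produced.
--
--     Keys are compared case-insensitively since Vorbis comments fold case
--     on disk. A key in ``new_tags`` but not in ``existing`` is ``added``;
--     a key in ``existing`` but not in ``new_tags`` is ``removed``; a key
--     in both whose list-of-values differs is ``changed``.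
--     """
--     existing_map: dict[str, list[str]] = {}
--     if existing:
--         for key in existing.keys():
--             try:
--                 existing_map[key.upper()] = list(existing[key])
--             except Exception:
--                 existing_map[key.upper()] = []
--     new_map = {k.upper(): list(v) for k, v in new_tags.items()}
--     existing_keys = set(existing_map.keys())
--     new_keys = set(new_map.keys())
--     added = len(new_keys - existing_keys)
--     removed = len(existing_keys - new_keys)
--     changed = sum(
--         1 for k in existing_keys & new_keys
--         if existing_map[k] != new_map[k]
--     )
--     return added, removed, changed
-- ===== SOURCE B (Python) =====
-- def _count_tag_deltas(
--     existing: dict | None,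
--     new_tags: dict[str, list[str]],
-- ) -> tuple[int, int, int]:
--     """Sorted two-pointer merge over the key lists instead of set algebra."""
--     existing_map: dict[str, list[str]] = {}
--     if existing:
--         for key in existing.keys():
--             try:
--                 existing_map[key.upper()] = list(existing[key])
--             except Exception:
--                 existing_map[key.upper()] = []
--     new_map = {k.upper(): list(v) for k, v in new_tags.items()}
--     ek = sorted(existing_map)
--     nk = sorted(new_map)
--     i = j = 0
--     added = removed = changed = 0
--     while i < len(ek) and j < len(nk):
--         if ek[i] < nk[j]:
--             removed += 1
--             i += 1
--         elif ek[i] > nk[j]: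
--             added += 1
--             j += 1
--         else:
--             if existing_map[ek[i]] != new_map[nk[j]]:
--                 changed += 1
--             i += 1
--             j += 1
--     removed += len(ek) - i
--     added += len(nk) - j
--     return added, removed, changed
-- ===== Notes on version B (the rewrite author's own statement) =====
-- stated objective: alternative
-- what changed: Replaces the hash-set algebra (two set differences and an intersection-filtered sum) with a sort-then-merge algorithm: both key lists are sorted and a single two-pointer merge classifies every key as added, removed or changed/unchanged in one pass.
import Mathlib
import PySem

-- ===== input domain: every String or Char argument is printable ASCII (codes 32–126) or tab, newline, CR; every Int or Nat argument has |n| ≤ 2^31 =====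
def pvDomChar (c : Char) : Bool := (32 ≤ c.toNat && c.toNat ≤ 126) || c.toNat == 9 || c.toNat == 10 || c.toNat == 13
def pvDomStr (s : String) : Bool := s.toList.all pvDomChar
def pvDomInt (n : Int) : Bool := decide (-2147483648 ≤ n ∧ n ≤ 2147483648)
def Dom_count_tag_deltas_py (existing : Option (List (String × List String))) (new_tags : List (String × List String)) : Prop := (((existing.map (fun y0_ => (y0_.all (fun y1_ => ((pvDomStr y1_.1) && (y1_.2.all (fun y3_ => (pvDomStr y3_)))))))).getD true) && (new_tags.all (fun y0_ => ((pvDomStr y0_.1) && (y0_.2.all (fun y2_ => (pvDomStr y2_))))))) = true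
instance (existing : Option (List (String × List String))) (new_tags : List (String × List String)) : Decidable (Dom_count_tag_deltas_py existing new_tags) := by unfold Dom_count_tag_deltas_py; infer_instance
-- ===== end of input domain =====

-- B replaces A's hash-set algebra with a sort-then-merge algorithm (sort both key
-- lists, classify every key in one two-pointer merge pass); equivalence of return
-- values is proved (neither version mutates its arguments).

-- ===== PORT A =====
-- Shared map-building code (IDENTICAL lines in both Python versions):
-- the dict parameters become PySem.Dicts (last duplicate wins, first position).
-- 'if existing:' skips the loop for None/empty — folding over an empty dict is
-- already a no-op, so only the None case needs a branch.
-- 'try: ... list(existing[key]) except: []' — existing[key] is a present key's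
-- list value here, so list() always succeeds; the except branch is dead and the
-- getD default is never used.
def pvExistingMap (existing : Option (List (String × List String))) : PySem.Dict String (List String) :=
  match existing with
  | none => PySem.Dict.empty
  | some l =>
      let d := PySem.Dict.ofList l
      d.keys.foldl (fun m k => m.insert (PySem.Str.upper k) (d.getD k [])) PySem.Dict.empty

-- new_map = {k.upper(): list(v) for k, v in new_tags.items()}
def pvNewMap (new_tags : List (String × List String)) : PySem.Dict String (List String) :=
  (PySem.Dict.ofList new_tags).items.foldl
    (fun m kv => m.insert (PySem.Str.upper kv.1) kv.2) PySem.Dict.empty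

-- Port of A: build the two key sets, count two set differences and sum over the
-- intersection (a sum over a set is order-independent, so the fold order is exact).
def count_tag_deltas_py (existing : Option (List (String × List String))) (new_tags : List (String × List String)) : Int × Int × Int :=
  let existing_map := pvExistingMap existing
  let new_map := pvNewMap new_tags
  let existing_keys : PySem.Set String := PySem.Set.ofList existing_map.keys
  let new_keys : PySem.Set String := PySem.Set.ofList new_map.keys
  let added : Int := (PySem.Set.diff new_keys existing_keys).length
  let removed : Int := (PySem.Set.diff existing_keys new_keys).length
  -- existing_map[k] / new_map[k] : k is in the intersection, so the key is
  -- present in both maps and getD's default is never used.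
  let changed : Int := (PySem.Set.inter existing_keys new_keys).foldl
      (fun c k => if existing_map.getD k [] ≠ new_map.getD k [] then c + 1 else c) 0
  (added, removed, changed)

-- ===== PORT B =====
-- the while loop of Source B: two sorted key lists consumed by a two-pointer merge,
-- accumulators (added, removed, changed); the two trailing '+= len(..) - i'
-- lines of Source B are the two base cases (the other pointer is exhausted there)
def pvMergeLoop (E N : PySem.Dict String (List String)) :
    List String → List String → Int → Int → Int → Int × Int × Int
  | [], ns, a, r, c => (a + ns.length, r, c)
  | _ :: es, [], a, r, c => (a, r + (es.length + 1 : Nat), c)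
  | e :: es, n :: ns, a, r, c =>
    if e < n then pvMergeLoop E N es (n :: ns) a (r + 1) c
    else if n < e then pvMergeLoop E N (e :: es) ns (a + 1) r c
    else pvMergeLoop E N es ns a r (if E.getD e [] ≠ N.getD n [] then c + 1 else c)

def count_tag_deltas_py_alt (existing : Option (List (String × List String))) (new_tags : List (String × List String)) : Int × Int × Int :=
  let existing_map := pvExistingMap existing
  let new_map := pvNewMap new_tags
  let ek := PySem.List.sorted existing_map.keys (fun x => x) false   -- sorted(existing_map)
  let nk := PySem.List.sorted new_map.keys (fun x => x) false        -- sorted(new_map)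
  pvMergeLoop existing_map new_map ek nk 0 0 0

-- ===== PRECONDITION & SPEC =====
def Spec_count_tag_deltas_py (existing : Option (List (String × List String))) (new_tags : List (String × List String)) (out : Int × Int × Int) : Prop := out = count_tag_deltas_py_alt existing new_tags
instance (existing : Option (List (String × List String))) (new_tags : List (String × List String)) (out : Int × Int × Int) : Decidable (Spec_count_tag_deltas_py existing new_tags out) := by unfold Spec_count_tag_deltas_py; infer_instance

-- ===== CLAIM (what is proved, stated in full; the proofs are below) =====
def Claim_equal_count_tag_deltas_py : Prop := ∀ (existing : Option (List (String × List String))) (new_tags : List (String × List String)), Dom_count_tag_deltas_py existing new_tags → Spec_count_tag_deltas_py existing new_tags (count_tag_deltas_py existing new_tags)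

-- ===== LEMMAS AND PROOFS =====

-- a counting fold is countP
theorem pv_foldl_count {α : Type} (p : α → Prop) [DecidablePred p] (l : List α) (a : Int) :
    l.foldl (fun a x => if p x then a + 1 else a) a = a + l.countP (fun x => decide (p x)) := by
  induction l generalizing a with
  | nil => simp
  | cons x xs ih =>
      simp only [List.foldl_cons, List.countP_cons, ih]
      by_cases h : p x
      · simp [h]; ring
      · simp [h]

theorem pv_nodup_existing (existing : Option (List (String × List String))) :
    (pvExistingMap existing).keys.Nodup := by
  cases existing with
  | none => simp [pvExistingMap, PySem.Dict.keys_empty]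
  | some l =>
      exact PySem.Dict.nodup_keys_foldl_insert_key _ _ _ _ (by simp [PySem.Dict.keys_empty])

theorem pv_nodup_new (new_tags : List (String × List String)) :
    (pvNewMap new_tags).keys.Nodup := by
  exact PySem.Dict.nodup_keys_foldl_insert_key _ _ _ _ (by simp [PySem.Dict.keys_empty])

-- the merge loop over two STRICTLY increasing lists computes the three countPs
theorem pv_merge_eq (E N : PySem.Dict String (List String)) :
    ∀ (xs : List String), xs.Pairwise (· < ·) →
    ∀ (ys : List String), ys.Pairwise (· < ·) →
    ∀ (a r c : Int),
    pvMergeLoop E N xs ys a r c =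
      (a + ys.countP (fun k => decide (k ∉ xs)),
       r + xs.countP (fun k => decide (k ∉ ys)),
       c + xs.countP (fun k => decide (k ∈ ys ∧ E.getD k [] ≠ N.getD k []))) := by
  intro xs
  induction xs with
  | nil =>
      intro _ ys _ a r c
      simp [pvMergeLoop]
  | cons e es ih =>
      intro hpx ys
      obtain ⟨he, hes⟩ := List.pairwise_cons.mp hpx
      induction ys with
      | nil =>
          intro _ a r c
          simp [pvMergeLoop]
      | cons n ns ih2 =>
          intro hpy a r c
          obtain ⟨hn, hns⟩ := List.pairwise_cons.mp hpy
          by_cases h1 : e < n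
          · have hex : ∀ x ∈ n :: ns, e < x := by
              intro x hx
              rcases List.mem_cons.mp hx with h | h
              · exact h ▸ h1
              · exact h1.trans (hn x h)
            rw [pvMergeLoop, if_pos h1, ih hes (n :: ns) hpy]
            have h2 : (n :: ns).countP (fun k => decide (k ∉ es))
                = (n :: ns).countP (fun k => decide (k ∉ e :: es)) := by
              apply List.countP_congr
              intro x hx
              have : x ≠ e := fun h => absurd (h ▸ hex x hx) (lt_irrefl x)
              simp [List.mem_cons, this]
            have h3 : e ∉ n :: ns := fun h => absurd (hex e h) (lt_irrefl e)
            rw [h2]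
            refine Prod.ext rfl (Prod.ext ?_ ?_)
            · simp only [List.countP_cons, decide_eq_true_eq, h3]
              simp; ring
            · simp only [List.countP_cons, h3]
              simp
          · by_cases h2 : n < e
            · have hny : ∀ x ∈ e :: es, n < x := by
                intro x hx
                rcases List.mem_cons.mp hx with h | h
                · exact h ▸ h2
                · exact h2.trans (he x h)
              rw [pvMergeLoop, if_neg h1, if_pos h2, ih2 hns]
              have h3 : n ∉ e :: es := fun h => absurd (hny n h) (lt_irrefl n)
              have h5 : (e :: es).countP (fun k => decide (k ∉ ns))
                  = (e :: es).countP (fun k => decide (k ∉ n :: ns)) := by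
                apply List.countP_congr
                intro x hx
                have : x ≠ n := fun h => absurd (h ▸ hny x hx) (lt_irrefl x)
                simp [List.mem_cons, this]
              have h6 : (e :: es).countP (fun k => decide (k ∈ ns ∧ E.getD k [] ≠ N.getD k []))
                  = (e :: es).countP (fun k => decide (k ∈ n :: ns ∧ E.getD k [] ≠ N.getD k [])) := by
                apply List.countP_congr
                intro x hx
                have : x ≠ n := fun h => absurd (h ▸ hny x hx) (lt_irrefl x)
                simp [List.mem_cons, this]
              rw [h5, h6]
              refine Prod.ext ?_ rfl
              simp only [List.countP_cons, decide_eq_true_eq, h3]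
              simp; ring
            · have heq : e = n := le_antisymm (not_lt.mp h2) (not_lt.mp h1)
              subst heq
              rw [pvMergeLoop, if_neg h1, if_neg h2, ih hes ns hns]
              have hxe : ∀ x ∈ es, x ≠ e := fun x hx h => absurd (h ▸ he x hx) (lt_irrefl x)
              have hye : ∀ x ∈ ns, x ≠ e := fun x hx h => absurd (h ▸ hn x hx) (lt_irrefl x)
              have h5 : ns.countP (fun k => decide (k ∉ es))
                  = ns.countP (fun k => decide (k ∉ e :: es)) := by
                apply List.countP_congr
                intro x hx
                simp [List.mem_cons, hye x hx]
              have h6 : es.countP (fun k => decide (k ∉ ns))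
                  = es.countP (fun k => decide (k ∉ e :: ns)) := by
                apply List.countP_congr
                intro x hx
                simp [List.mem_cons, hxe x hx]
              have h7 : es.countP (fun k => decide (k ∈ ns ∧ E.getD k [] ≠ N.getD k []))
                  = es.countP (fun k => decide (k ∈ e :: ns ∧ E.getD k [] ≠ N.getD k [])) := by
                apply List.countP_congr
                intro x hx
                simp [List.mem_cons, hxe x hx]
              rw [h5, h6, h7]
              have hein : e ∈ e :: ns := List.mem_cons_self
              refine Prod.ext ?_ (Prod.ext ?_ ?_)
              · simp only [List.countP_cons, decide_eq_true_eq, List.mem_cons]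
                simp
              · simp only [List.countP_cons, decide_eq_true_eq, List.mem_cons]
                simp
              · simp only [List.countP_cons, decide_eq_true_eq, hein]
                by_cases hd : E.getD e [] ≠ N.getD e []
                · simp [hd]; ring
                · simp [hd]

-- strict sortedness of sorted(keys) for a Nodup key list
theorem pv_sorted_strict (l : List String) (h : l.Nodup) :
    (PySem.List.sorted l (fun x => x) false).Pairwise (· < ·) := by
  have hperm := PySem.List.sorted_perm l (fun x => x) false
  have hnd : (PySem.List.sorted l (fun x => x) false).Nodup := hperm.nodup_iff.mpr h
  have hle : (PySem.List.sorted l (fun x => x) false).Pairwise (fun a b => a ≤ b) :=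
    PySem.List.sorted_pairwise l (fun x => x)
  have := List.Pairwise.and hle (List.nodup_iff_pairwise_ne.mp hnd)
  exact this.imp (fun h => lt_of_le_of_ne h.1 h.2)

-- B in countP normal form over the two key lists
theorem pv_B_eq (E N : PySem.Dict String (List String))
    (hE : E.keys.Nodup) (hN : N.keys.Nodup) :
    pvMergeLoop E N (PySem.List.sorted E.keys (fun x => x) false)
        (PySem.List.sorted N.keys (fun x => x) false) 0 0 0 =
      (((N.keys.countP (fun k => decide (k ∉ E.keys)) : Nat) : Int),
       ((E.keys.countP (fun k => decide (k ∉ N.keys)) : Nat) : Int),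
       ((E.keys.countP (fun k => decide (k ∈ N.keys ∧ E.getD k [] ≠ N.getD k [])) : Nat) : Int)) := by
  have hpE := PySem.List.sorted_perm E.keys (fun x => x) false
  have hpN := PySem.List.sorted_perm N.keys (fun x => x) false
  rw [pv_merge_eq E N _ (pv_sorted_strict _ hE) _ (pv_sorted_strict _ hN)]
  have h1 : (PySem.List.sorted N.keys (fun x => x) false).countP
      (fun k => decide (k ∉ PySem.List.sorted E.keys (fun x => x) false))
      = N.keys.countP (fun k => decide (k ∉ E.keys)) := by
    rw [hpN.countP_eq]
    apply List.countP_congr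
    intro x _
    simp [hpE.mem_iff]
  have h2 : (PySem.List.sorted E.keys (fun x => x) false).countP
      (fun k => decide (k ∉ PySem.List.sorted N.keys (fun x => x) false))
      = E.keys.countP (fun k => decide (k ∉ N.keys)) := by
    rw [hpE.countP_eq]
    apply List.countP_congr
    intro x _
    simp [hpN.mem_iff]
  have h3 : (PySem.List.sorted E.keys (fun x => x) false).countP
      (fun k => decide (k ∈ PySem.List.sorted N.keys (fun x => x) false ∧ E.getD k [] ≠ N.getD k []))
      = E.keys.countP (fun k => decide (k ∈ N.keys ∧ E.getD k [] ≠ N.getD k [])) := by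
    rw [hpE.countP_eq]
    apply List.countP_congr
    intro x _
    simp [hpN.mem_iff]
  rw [h1, h2, h3]
  simp

-- A in the same countP normal form
theorem pv_A_eq (E N : PySem.Dict String (List String))
    (hE : E.keys.Nodup) (hN : N.keys.Nodup) :
    ((((PySem.Set.diff (PySem.Set.ofList N.keys) (PySem.Set.ofList E.keys)).length : Int)),
      (((PySem.Set.diff (PySem.Set.ofList E.keys) (PySem.Set.ofList N.keys)).length : Int)),
      ((PySem.Set.inter (PySem.Set.ofList E.keys) (PySem.Set.ofList N.keys)).foldl
        (fun c k => if E.getD k [] ≠ N.getD k [] then c + 1 else c) (0 : Int)))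
    = (((N.keys.countP (fun k => decide (k ∉ E.keys)) : Nat) : Int),
       ((E.keys.countP (fun k => decide (k ∉ N.keys)) : Nat) : Int),
       ((E.keys.countP (fun k => decide (k ∈ N.keys ∧ E.getD k [] ≠ N.getD k [])) : Nat) : Int)) := by
  rw [PySem.Set.ofList_eq_self_of_nodup _ hE, PySem.Set.ofList_eq_self_of_nodup _ hN]
  simp only [PySem.Set.diff, PySem.Set.inter, pv_foldl_count, ← List.countP_eq_length_filter,
    zero_add]
  rw [Prod.mk.injEq, Prod.mk.injEq]
  refine ⟨?_, ?_, ?_⟩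
  · congr 1
    apply List.countP_congr
    intro k _
    simp [PySem.Set.contains]
  · congr 1
    apply List.countP_congr
    intro k _
    simp [PySem.Set.contains]
  · rw [List.countP_filter]
    congr 1
    apply List.countP_congr
    intro k _
    simp [PySem.Set.contains, Bool.and_comm]

-- ===== VERDICT (by name: the statement is the Claim_ definition above) =====
theorem count_tag_deltas_py_spec : Claim_equal_count_tag_deltas_py := by
  intro existing new_tags _
  unfold Spec_count_tag_deltas_py count_tag_deltas_py count_tag_deltas_py_alt
  rw [pv_A_eq _ _ (pv_nodup_existing existing) (pv_nodup_new new_tags),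
    pv_B_eq _ _ (pv_nodup_existing existing) (pv_nodup_new new_tags)]
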